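-- pv_equiv track=rewrite | github.com/369harshit/step5-strings | sum of beauty of all substrings.py | beauty_value
-- ===== SOURCE A (Python) =====
-- def beauty_value(substring):
--     # Calculate the beauty value for a single substring
--     char_freq = {}
--     for char in substring:
--         if char in char_freq:
--             char_freq[char] += 1
--         else:
--             char_freq[char] = 1
--     max_freq = max(char_freq.values())
--     min_freq = min(char_freq.values())
--     return max_freq - min_freq
-- ===== SOURCE B (Python) =====
-- def beauty_value(substring):
--     # Sort the characters, then scan consecutive equal runs, collecting run lengths.
--     s = sorted(substring)
--     counts = []
--     i = 0
--     n = len(s)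
--     while i < n:
--         j = i
--         while j < n and s[j] == s[i]:
--             j += 1
--         counts.append(j - i)
--         i = j
--     return max(counts) - min(counts)
-- ===== Notes on version B (the rewrite author's own statement) =====
-- stated objective: alternative
-- what changed: Replaces the hash-table frequency dict with a sort-then-scan over consecutive equal runs of the sorted characters, taking max and min of the run lengths.
import Mathlib
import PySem

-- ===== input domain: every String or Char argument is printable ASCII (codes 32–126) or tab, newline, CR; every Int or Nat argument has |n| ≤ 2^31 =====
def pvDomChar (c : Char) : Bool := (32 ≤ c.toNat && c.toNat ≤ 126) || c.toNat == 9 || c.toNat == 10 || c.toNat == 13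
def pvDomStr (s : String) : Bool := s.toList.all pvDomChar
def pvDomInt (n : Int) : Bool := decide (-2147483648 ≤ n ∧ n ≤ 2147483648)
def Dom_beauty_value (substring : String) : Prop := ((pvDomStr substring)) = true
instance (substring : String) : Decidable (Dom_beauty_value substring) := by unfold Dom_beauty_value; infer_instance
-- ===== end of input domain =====

-- B replaces A's frequency dict with a sort-then-scan over equal runs; equivalence of the return value on nonempty strings.

-- ===== PORT A =====
def beauty_value (substring : String) : Int :=
  let char_freq := substring.toList.foldl
    (fun d c => if d.contains c then d.insert c (d.getD c 0 + 1) else d.insert c 1)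
    (PySem.Dict.empty : PySem.Dict Char Int)
  let max_freq := (PySem.List.max? char_freq.values (fun v => v)).getD 0
  let min_freq := (PySem.List.min? char_freq.values (fun v => v)).getD 0
  max_freq - min_freq

-- ===== PORT B =====
-- inner while loop: advance j past the run of characters equal to s[i]; the run length is appended
def pvRuns : List Char → List Int
  | [] => []
  | c :: t => ((t.takeWhile (· == c)).length + 1 : Int) :: pvRuns (t.dropWhile (· == c))
termination_by l => l.length
decreasing_by
  simpa using Nat.lt_succ_of_le (List.length_dropWhile_le _ _)

def beauty_value_alt (substring : String) : Int :=
  let s := PySem.List.sorted substring.toList (fun c => c) false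
  let counts := pvRuns s
  (PySem.List.max? counts (fun v => v)).getD 0 - (PySem.List.min? counts (fun v => v)).getD 0

-- ===== PRECONDITION & SPEC =====
-- Pre_ excludes only the empty string, on which A's max() raises ValueError (B's max() raises too).
def Pre_beauty_value (substring : String) : Prop := substring.toList ≠ []
instance (substring : String) : Decidable (Pre_beauty_value substring) := by unfold Pre_beauty_value; infer_instance
def pvWitness_beauty_value : String := "abca"

def Spec_beauty_value (substring : String) (out : Int) : Prop := out = beauty_value_alt substring
instance (substring : String) (out : Int) : Decidable (Spec_beauty_value substring out) := by unfold Spec_beauty_value; infer_instance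

-- ===== CLAIM (what is proved, stated in full; the proofs are below) =====
def Claim_equal_beauty_value : Prop := ∀ (substring : String), Dom_beauty_value substring → Pre_beauty_value substring → Spec_beauty_value substring (beauty_value substring)

-- ===== LEMMAS AND PROOFS =====

-- A's branching update step is the plain counting insert
theorem pv_step_eq (d : PySem.Dict Char Int) (c : Char) :
    (if d.contains c then d.insert c (d.getD c 0 + 1) else d.insert c 1) = d.insert c (d.getD c 0 + 1) := by
  by_cases h : d.contains c = true
  · simp [h]
  · simp only [Bool.not_eq_true] at h
    simp [h, PySem.Dict.getD_of_not_contains d 0 h]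

-- A's dict values: one count per distinct character (first-occurrence order)
theorem pv_A_values (xs : List Char) :
    (xs.foldl (fun d c => if d.contains c then d.insert c (d.getD c 0 + 1) else d.insert c 1)
      (PySem.Dict.empty : PySem.Dict Char Int)).values
    = (PySem.Set.ofList xs).map (fun c => (xs.count c : Int)) := by
  have hf : (fun (d : PySem.Dict Char Int) c => if d.contains c then d.insert c (d.getD c 0 + 1) else d.insert c 1)
      = fun d c => d.insert c (d.getD c 0 + 1) := by
    funext d c; exact pv_step_eq d c
  rw [hf, PySem.Dict.foldl_insert_getD_add_one_eq_counter]
  show (PySem.Dict.counter xs).items.map (·.2) = _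
  rw [PySem.Dict.items_counter]
  simp

-- c does not reappear after its run in a sorted list
theorem pv_not_mem_dropWhile (c : Char) (t : List Char) (hch : ∀ x ∈ t, c ≤ x)
    (hp : t.Pairwise (· ≤ ·)) : c ∉ t.dropWhile (· == c) := by
  induction t with
  | nil => simp
  | cons x r ih =>
    rcases List.pairwise_cons.mp hp with ⟨hx, hr⟩
    by_cases hxc : (x == c) = true
    · rw [List.dropWhile_cons, if_pos hxc]
      exact ih (fun y hy => hch y (List.mem_cons_of_mem x hy)) hr
    · rw [List.dropWhile_cons, if_neg hxc]
      intro hmem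
      rcases List.mem_cons.mp hmem with hceq | hcr
      · exact hxc (by simp [hceq])
      · have h1 : x ≤ c := hx c hcr
        have h2 : c ≤ x := hch x (List.mem_cons_self)
        exact hxc (by simp [le_antisymm h1 h2])

-- the run lengths of a sorted list are exactly the counts of its members
theorem pv_runs_mem (l : List Char) (h : l.Pairwise (· ≤ ·)) (v : Int) :
    v ∈ pvRuns l ↔ ∃ c ∈ l, v = (List.count c l : Int) := by
  induction l using pvRuns.induct with
  | case1 => simp [pvRuns]
  | case2 c t ih =>
    rcases List.pairwise_cons.mp h with ⟨hct, ht⟩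
    have hpd : (t.dropWhile (· == c)).Pairwise (· ≤ ·) :=
      List.Pairwise.sublist (List.dropWhile_sublist _) ht
    have hcd : c ∉ t.dropWhile (· == c) := pv_not_mem_dropWhile c t hct ht
    have htw : ∀ x ∈ t.takeWhile (· == c), x = c := by
      intro x hx
      have := List.mem_takeWhile_imp hx
      simpa using this
    have hsplit : t.takeWhile (· == c) ++ t.dropWhile (· == c) = t :=
      List.takeWhile_append_dropWhile
    -- count of c in c :: t is the head-run length + 1
    have hcount_c : List.count c (c :: t) = (t.takeWhile (· == c)).length + 1 := by
      have h1 : List.count c (t.takeWhile (· == c)) = (t.takeWhile (· == c)).length :=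
        List.count_eq_length.mpr (fun b hb => (htw b hb).symm)
      have h2 : List.count c (t.dropWhile (· == c)) = 0 := List.count_eq_zero.mpr hcd
      rw [List.count_cons, ← hsplit, List.count_append, h1, h2]
      simp
    -- counts of later characters are unchanged by dropping the head run
    have hcount_d : ∀ c' ∈ t.dropWhile (· == c),
        List.count c' (c :: t) = List.count c' (t.dropWhile (· == c)) := by
      intro c' hc'
      have hne : c' ≠ c := fun he => hcd (he ▸ hc')
      have h0 : List.count c' (t.takeWhile (· == c)) = 0 :=
        List.count_eq_zero.mpr (fun hmem => hne (htw c' hmem))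
      rw [List.count_cons, ← hsplit, List.count_append, h0]
      simp [hne.symm]
    rw [pvRuns]
    simp only [List.mem_cons]
    rw [ih hpd]
    constructor
    · rintro (hv | ⟨c', hc', hv⟩)
      · exact ⟨c, Or.inl rfl, by rw [hcount_c]; push_cast [hv]; ring⟩
      · refine ⟨c', Or.inr ?_, by rw [hcount_d c' hc']; exact hv⟩
        have := List.Sublist.mem hc' (List.dropWhile_sublist _)
        exact this
    · rintro ⟨c', hc'mem, hv⟩
      rcases hc'mem with rfl | hc't
      · left; rw [hcount_c] at hv; push_cast at hv ⊢; omega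
      · rcases List.mem_append.mp (hsplit ▸ hc't) with hc'tw | hc'td
        · left
          have : c' = c := htw c' hc'tw
          subst this
          rw [hcount_c] at hv; push_cast at hv ⊢; omega
        · right
          exact ⟨c', hc'td, by rw [← hcount_d c' hc'td]; exact hv⟩

-- max?/min? with identity key depend only on membership
theorem pv_max_ext (l1 l2 : List Int) (h : ∀ v, v ∈ l1 ↔ v ∈ l2) :
    PySem.List.max? l1 (fun v => v) = PySem.List.max? l2 (fun v => v) := by
  cases h1 : PySem.List.max? l1 (fun v => v) with
  | none =>
    rw [PySem.List.max?_eq_none_iff] at h1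
    subst h1
    symm
    rw [PySem.List.max?_eq_none_iff]
    exact List.eq_nil_iff_forall_not_mem.mpr (fun v hv => by simpa using (h v).mpr hv)
  | some m =>
    have hm1 : m ∈ l1 := PySem.List.max?_mem h1
    have hb1 : ∀ y ∈ l1, y ≤ m := fun y hy => PySem.List.max?_isMax h1 y hy
    cases h2 : PySem.List.max? l2 (fun v => v) with
    | none =>
      rw [PySem.List.max?_eq_none_iff] at h2
      exact absurd ((h m).mp hm1) (h2 ▸ List.not_mem_nil)
    | some m' =>
      have hm2 : m' ∈ l2 := PySem.List.max?_mem h2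
      have hb2 : ∀ y ∈ l2, y ≤ m' := fun y hy => PySem.List.max?_isMax h2 y hy
      have := le_antisymm (hb2 m ((h m).mp hm1)) (hb1 m' ((h m').mpr hm2))
      rw [this]

theorem pv_min_ext (l1 l2 : List Int) (h : ∀ v, v ∈ l1 ↔ v ∈ l2) :
    PySem.List.min? l1 (fun v => v) = PySem.List.min? l2 (fun v => v) := by
  cases h1 : PySem.List.min? l1 (fun v => v) with
  | none =>
    rw [PySem.List.min?_eq_none_iff] at h1
    subst h1
    symm
    rw [PySem.List.min?_eq_none_iff]
    exact List.eq_nil_iff_forall_not_mem.mpr (fun v hv => by simpa using (h v).mpr hv)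
  | some m =>
    have hm1 : m ∈ l1 := PySem.List.min?_mem h1
    have hb1 : ∀ y ∈ l1, m ≤ y := fun y hy => PySem.List.min?_isMin h1 y hy
    cases h2 : PySem.List.min? l2 (fun v => v) with
    | none =>
      rw [PySem.List.min?_eq_none_iff] at h2
      exact absurd ((h m).mp hm1) (h2 ▸ List.not_mem_nil)
    | some m' =>
      have hm2 : m' ∈ l2 := PySem.List.min?_mem h2
      have hb2 : ∀ y ∈ l2, m' ≤ y := fun y hy => PySem.List.min?_isMin h2 y hy
      have := le_antisymm (hb1 m' ((h m').mpr hm2)) (hb2 m ((h m).mp hm1))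
      rw [this]

-- ===== VERDICT (by name: the statement is the Claim_ definition above) =====
theorem beauty_value_spec : Claim_equal_beauty_value := by
  intro s _ _
  unfold Spec_beauty_value beauty_value beauty_value_alt
  dsimp only
  rw [pv_A_values]
  have hperm : (PySem.List.sorted s.toList (fun c => c) false).Perm s.toList :=
    PySem.List.sorted_perm s.toList (fun c => c) false
  have hpair : (PySem.List.sorted s.toList (fun c => c) false).Pairwise (· ≤ ·) :=
    PySem.List.sorted_pairwise s.toList (fun c => c)
  have hmem : ∀ v, v ∈ (PySem.Set.ofList s.toList).map (fun c => (List.count c s.toList : Int))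
      ↔ v ∈ pvRuns (PySem.List.sorted s.toList (fun c => c) false) := by
    intro v
    rw [pv_runs_mem _ hpair v]
    simp only [List.mem_map, PySem.Set.mem_ofList]
    constructor
    · rintro ⟨c, hc, rfl⟩
      exact ⟨c, hperm.mem_iff.mpr hc, by rw [hperm.count_eq c]⟩
    · rintro ⟨c, hc, rfl⟩
      exact ⟨c, hperm.mem_iff.mp hc, by rw [hperm.count_eq c]⟩
  rw [pv_max_ext _ _ hmem, pv_min_ext _ _ hmem]
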